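-- pv_equiv track=rewrite | github.com/FranciscoRamirezRuiz/Trabajo-2-analisis-de-algoritmos | solucion_pd.py | escape_tridimensional
-- ===== SOURCE A (Python) =====
-- def escape_tridimensional(mapa, n):
--     """
--     Resuelve el problema usando una tabla tridimensional de programación dinámica.
--     """
--     dp = [[[-1 for _ in range(2 * n)] for _ in range(n)] for _ in range(n)]
--
--     def f(fila, columna, paso):
--         if fila < 0 or fila >= n or columna < 0 or columna >= n or mapa[fila][columna] == 'B':
--             return -1
--         if paso == 2 * n - 1:
--             return 0
--         if dp[fila][columna][paso] != -1:
--             return dp[fila][columna][paso]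
--
--         max_capsulas = max(
--             f(fila + 1, columna, paso + 1),
--             f(fila - 1, columna, paso + 1),
--             f(fila, columna + 1, paso + 1),
--             f(fila, columna - 1, paso + 1)
--         )
--
--         if mapa[fila][columna] == 'R':
--             max_capsulas += 1
--
--         dp[fila][columna][paso] = max_capsulas
--         return max_capsulas
--
--     return f(0, 0, 0)
-- ===== SOURCE B (Python) =====
-- def escape_tridimensional(mapa, n):
--     """
--     Bottom-up tabulation: one n x n layer per step, built from the last step
--     (paso = 2n-1) backwards, keeping only the next layer at each step.
--     """
--     if n <= 0:
--         return -1
--     if mapa[0][0] == 'B':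
--         return -1
--     # layer for the final step: 0 on every non-blocked cell, -1 on 'B'
--     layer = [[-1 if mapa[f][c] == 'B' else 0 for c in range(n)] for f in range(n)]
--     for _ in range(2 * n - 1):
--         prev = layer
--         nxt = []
--         for f in range(n):
--             row = []
--             for c in range(n):
--                 if mapa[f][c] == 'B':
--                     row.append(-1)
--                     continue
--                 best = -1
--                 for df, dc in ((1, 0), (-1, 0), (0, 1), (0, -1)):
--                     nf, nc = f + df, c + dc
--                     if 0 <= nf < n and 0 <= nc < n:
--                         v = prev[nf][nc]
--                         if best < v:
--                             best = v
--                 row.append(best + 1 if mapa[f][c] == 'R' else best)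
--             nxt.append(row)
--         layer = nxt
--     return layer[0][0]
-- ===== Notes on version B (the rewrite author's own statement) =====
-- stated objective: alternative
-- what changed: Replaced the top-down memoized recursion (3D memo table indexed [fila][columna][paso]) by an iterative bottom-up tabulation that keeps only one n x n layer per step, built from the last step backwards.
-- outside the precondition, e.g. on escape_tridimensional([['.', 'B'], ['B']], 2): A returns -1, B raises IndexError
import Mathlib
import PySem

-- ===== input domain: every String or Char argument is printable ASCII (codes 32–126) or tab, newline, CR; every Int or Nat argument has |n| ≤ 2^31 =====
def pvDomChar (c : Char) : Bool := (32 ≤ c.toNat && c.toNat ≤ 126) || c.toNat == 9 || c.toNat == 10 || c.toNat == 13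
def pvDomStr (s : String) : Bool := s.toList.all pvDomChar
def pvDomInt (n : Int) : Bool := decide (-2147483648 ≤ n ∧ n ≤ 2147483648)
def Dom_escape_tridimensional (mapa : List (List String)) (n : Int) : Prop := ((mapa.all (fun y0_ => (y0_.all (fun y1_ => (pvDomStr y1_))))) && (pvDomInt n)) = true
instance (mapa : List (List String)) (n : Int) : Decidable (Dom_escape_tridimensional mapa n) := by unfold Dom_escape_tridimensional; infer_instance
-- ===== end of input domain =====

-- B replaces A's top-down memoized recursion by a bottom-up per-step tabulation (alternative decomposition, same recurrence).


-- ===== PORT A =====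

-- mapa[f][c]; both ports only read cells with 0 ≤ f < n, 0 ≤ c < n, which Pre_ guarantees exist,
-- so the "" default of getD is never reached on admitted inputs.
def pvCell (mapa : List (List String)) (f c : Int) : String :=
  (PySem.List.pyGet? ((PySem.List.pyGet? mapa f).getD []) c).getD ""

-- dp[fila][columna][paso]; A only reads it with 0 ≤ fila,columna < n and 0 ≤ paso < 2n-1,
-- in range of the n×n×2n table, so the defaults are never reached on admitted inputs.
def pvDpGet (dp : List (List (List Int))) (fila columna paso : Int) : Int :=
  (PySem.List.pyGet?
    ((PySem.List.pyGet? ((PySem.List.pyGet? dp fila).getD []) columna).getD [])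
    paso).getD (-1)

-- dp[fila][columna][paso] = v; A only assigns at nonnegative in-range indices, where this is exact.
def pvDpSet (dp : List (List (List Int))) (fila columna paso : Int) (v : Int) :
    List (List (List Int)) :=
  dp.modify fila.toNat (fun plane => plane.modify columna.toNat (fun cell => cell.set paso.toNat v))

-- the inner function f of A, with the memo table threaded through; fuel = 2n-1 - paso at every
-- actual call (the fuel-0 fallback merely totalises the recursion and is unreachable from the top call)
def pvFA (mapa : List (List String)) (n : Int) :
    Nat → Int → Int → Int → List (List (List Int)) → Int × List (List (List Int))
  | fuel, fila, columna, paso, dp =>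
    if fila < 0 ∨ n ≤ fila ∨ columna < 0 ∨ n ≤ columna ∨ pvCell mapa fila columna = "B" then
      (-1, dp)
    else if paso = 2 * n - 1 then (0, dp)
    else
      match fuel with
      | 0 => (0, dp)
      | fuel' + 1 =>
        let cached := pvDpGet dp fila columna paso
        if cached ≠ -1 then (cached, dp)
        else
          let r1 := pvFA mapa n fuel' (fila + 1) columna (paso + 1) dp
          let r2 := pvFA mapa n fuel' (fila - 1) columna (paso + 1) r1.2
          let r3 := pvFA mapa n fuel' fila (columna + 1) (paso + 1) r2.2
          let r4 := pvFA mapa n fuel' fila (columna - 1) (paso + 1) r3.2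
          let m := max (max (max r1.1 r2.1) r3.1) r4.1
          let m' := if pvCell mapa fila columna = "R" then m + 1 else m
          (m', pvDpSet r4.2 fila columna paso m')

def escape_tridimensional (mapa : List (List String)) (n : Int) : Int :=
  let dp := List.replicate n.toNat (List.replicate n.toNat (List.replicate (2 * n).toNat (-1)))
  (pvFA mapa n (2 * n - 1).toNat 0 0 0 dp).1

-- ===== PORT B =====

-- layer[f][c]; B only reads in-range nonnegative indices, so the defaults are never reached.
def pvLayAt (lay : List (List Int)) (f c : Int) : Int :=
  (PySem.List.pyGet? ((PySem.List.pyGet? lay f).getD []) c).getD (-1)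

def pvDirs : List (Int × Int) := [(1, 0), (-1, 0), (0, 1), (0, -1)]

-- the body of B's inner `for df, dc in ...` loop: fold one direction into the running best
def pvBestStep (n : Int) (prev : List (List Int)) (f c : Int) (best : Int) (d : Int × Int) :
    Int :=
  let nf : Int := f + d.1
  let nc : Int := c + d.2
  if 0 ≤ nf ∧ nf < n ∧ 0 ≤ nc ∧ nc < n then
    (let v := pvLayAt prev nf nc; if best < v then v else best)
  else best

-- one backward step of the tabulation: layer for paso from the layer for paso+1
def pvStep (mapa : List (List String)) (n : Int) (prev : List (List Int)) : List (List Int) :=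
  (List.range n.toNat).map fun (f : Nat) =>
    (List.range n.toNat).map fun (c : Nat) =>
      if pvCell mapa (f : Int) (c : Int) = "B" then -1
      else
        let best := pvDirs.foldl (pvBestStep n prev (f : Int) (c : Int)) (-1)
        if pvCell mapa (f : Int) (c : Int) = "R" then best + 1 else best

-- the layer for the final step paso = 2n-1
def pvLast (mapa : List (List String)) (n : Int) : List (List Int) :=
  (List.range n.toNat).map fun (f : Nat) =>
    (List.range n.toNat).map fun (c : Nat) =>
      if pvCell mapa (f : Int) (c : Int) = "B" then -1 else 0

def escape_tridimensional_alt (mapa : List (List String)) (n : Int) : Int :=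
  if n ≤ 0 then -1
  else if pvCell mapa 0 0 = "B" then -1
  else
    let lay := (List.range (2 * n - 1).toNat).foldl (fun prev _ => pvStep mapa n prev)
      (pvLast mapa n)
    pvLayAt lay 0 0

-- ===== PRECONDITION & SPEC =====
-- Pre_ admits n ≤ 0, a full n×n grid, and any grid whose start cell is 'B' (both programs
-- return -1 before reading anything else); it excludes the remaining short grids (fewer than n
-- rows, or a row shorter than n), on which A can still return -1 when walls shield the missing
-- cells by accident of its lazy exploration, while B (which builds the whole n×n table) raises
-- IndexError.
def Pre_escape_tridimensional (mapa : List (List String)) (n : Int) : Prop :=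
  n ≤ 0 ∨ (n.toNat ≤ mapa.length ∧ ∀ row ∈ mapa.take n.toNat, n.toNat ≤ row.length) ∨
    (mapa ≠ [] ∧ mapa.headD [] ≠ [] ∧ (mapa.headD []).headD "" = "B")
instance (mapa : List (List String)) (n : Int) : Decidable (Pre_escape_tridimensional mapa n) := by
  unfold Pre_escape_tridimensional; infer_instance

def pvWitness_escape_tridimensional : List (List String) × Int := ([["R", "."], [".", "x"]], 2)

def Spec_escape_tridimensional (mapa : List (List String)) (n : Int) (out : Int) : Prop := out = escape_tridimensional_alt mapa n
instance (mapa : List (List String)) (n : Int) (out : Int) : Decidable (Spec_escape_tridimensional mapa n out) := by unfold Spec_escape_tridimensional; infer_instance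

-- ===== CLAIM (what is proved, stated in full; the proofs are below) =====
def Claim_equal_escape_tridimensional : Prop := ∀ (mapa : List (List String)) (n : Int), Dom_escape_tridimensional mapa n → Pre_escape_tridimensional mapa n → Spec_escape_tridimensional mapa n (escape_tridimensional mapa n)

-- ===== LEMMAS AND PROOFS =====

-- the common pure recurrence: value of f(fila, columna, paso) with k = 2n-1 - paso steps left
def pvG (mapa : List (List String)) (n : Int) : Nat → Int → Int → Int
  | k, f, c =>
    if f < 0 ∨ n ≤ f ∨ c < 0 ∨ n ≤ c ∨ pvCell mapa f c = "B" then -1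
    else match k with
      | 0 => 0
      | k' + 1 =>
        if pvCell mapa f c = "R" then
          max (max (max (pvG mapa n k' (f + 1) c) (pvG mapa n k' (f - 1) c))
            (pvG mapa n k' f (c + 1))) (pvG mapa n k' f (c - 1)) + 1
        else
          max (max (max (pvG mapa n k' (f + 1) c) (pvG mapa n k' (f - 1) c))
            (pvG mapa n k' f (c + 1))) (pvG mapa n k' f (c - 1))

lemma pvG_ge_neg_one (mapa : List (List String)) (n : Int) (k : Nat) (f c : Int) :
    -1 ≤ pvG mapa n k f c := by
  cases k with
  | zero => rw [pvG]; split_ifs <;> omega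
  | succ k' =>
    rw [pvG]
    have h1 := pvG_ge_neg_one mapa n k' (f + 1) c
    have hA : (-1 : Int) ≤ max (max (max (pvG mapa n k' (f + 1) c) (pvG mapa n k' (f - 1) c))
        (pvG mapa n k' f (c + 1))) (pvG mapa n k' f (c - 1)) :=
      h1.trans ((le_max_left _ _).trans ((le_max_left _ _).trans (le_max_left _ _)))
    split_ifs <;> omega

lemma pvG_oob (mapa : List (List String)) (n : Int) (k : Nat) (f c : Int)
    (h : f < 0 ∨ n ≤ f ∨ c < 0 ∨ n ≤ c ∨ pvCell mapa f c = "B") :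
    pvG mapa n k f c = -1 := by
  cases k <;> rw [pvG] <;> simp [h]

def pvValid (mapa : List (List String)) (n : Int) (dp : List (List (List Int))) : Prop :=
  ∀ f c p : Int, 0 ≤ f → 0 ≤ c → 0 ≤ p → pvDpGet dp f c p ≠ -1 →
    pvDpGet dp f c p = pvG mapa n (2 * n - 1 - p).toNat f c

lemma pvDpGet_eq (dp : List (List (List Int))) (f c p : Int)
    (hf : 0 ≤ f) (hc : 0 ≤ c) (hp : 0 ≤ p) :
    pvDpGet dp f c p = ((((dp[f.toNat]?.getD [])[c.toNat]?).getD [])[p.toNat]?).getD (-1) := by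
  simp [pvDpGet, PySem.List.pyGet?_of_nonneg, hf, hc, hp]

lemma pvDpGet_set (dp : List (List (List Int))) (f c p v f' c' p' : Int)
    (hf : 0 ≤ f) (hc : 0 ≤ c) (hp : 0 ≤ p) (hf' : 0 ≤ f') (hc' : 0 ≤ c') (hp' : 0 ≤ p') :
    pvDpGet (pvDpSet dp f c p v) f' c' p' = pvDpGet dp f' c' p' ∨
      (f' = f ∧ c' = c ∧ p' = p ∧ pvDpGet (pvDpSet dp f c p v) f' c' p' = v) := by
  rw [pvDpGet_eq _ _ _ _ hf' hc' hp', pvDpGet_eq _ _ _ _ hf' hc' hp']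
  unfold pvDpSet
  rw [List.getElem?_modify]
  by_cases hff : f.toNat = f'.toNat
  · have hfeq : f' = f := by omega
    cases h1 : dp[f'.toNat]? with
    | none => simp
    | some plane =>
      simp only [Option.map_eq_map, Option.map_some, if_pos hff, Option.getD_some]
      rw [List.getElem?_modify]
      by_cases hcc : c.toNat = c'.toNat
      · have hceq : c' = c := by omega
        cases h2 : plane[c'.toNat]? with
        | none => simp
        | some cell =>
          simp only [Option.map_eq_map, Option.map_some, if_pos hcc, Option.getD_some]
          rw [List.getElem?_set]
          by_cases hpp : p.toNat = p'.toNat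
          · have hpeq : p' = p := by omega
            by_cases hlen : p.toNat < cell.length
            · simp only [if_pos hpp, if_pos hlen, Option.getD_some]
              exact Or.inr ⟨hfeq, hceq, hpeq, by trivial⟩
            · have h3 : cell[p'.toNat]? = none := by
                rw [List.getElem?_eq_none_iff]; omega
              simp [if_neg hlen, h3]
          · simp [if_neg hpp]
      · simp [if_neg hcc]
  · simp [if_neg hff]

lemma pvValid_set (mapa : List (List String)) (n : Int) (dp : List (List (List Int)))
    (f c p v : Int) (hf : 0 ≤ f) (hc : 0 ≤ c) (hp : 0 ≤ p)
    (hd : pvValid mapa n dp) (hv : v = pvG mapa n (2 * n - 1 - p).toNat f c) :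
    pvValid mapa n (pvDpSet dp f c p v) := by
  intro f' c' p' hf' hc' hp' hne
  rcases pvDpGet_set dp f c p v f' c' p' hf hc hp hf' hc' hp' with h | ⟨rf, rc, rp, h⟩
  · rw [h] at hne ⊢; exact hd f' c' p' hf' hc' hp' hne
  · rw [h, rf, rc, rp, hv]

lemma pvValid_init (mapa : List (List String)) (n : Int) (a b d : Nat) :
    pvValid mapa n (List.replicate a (List.replicate b (List.replicate d (-1)))) := by
  intro f c p hf hc hp hne
  exfalso
  apply hne
  rw [pvDpGet_eq _ _ _ _ hf hc hp]
  simp only [List.getElem?_replicate]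
  split_ifs <;> simp [List.getElem?_replicate] <;> split_ifs <;>
    simp [List.getElem?_replicate] <;> split_ifs <;> simp

lemma pvFA_correct (mapa : List (List String)) (n : Int) (k : Nat) :
    ∀ (fila columna paso : Int) (dp : List (List (List Int))),
      paso = 2 * n - 1 - (k : Int) → 0 ≤ paso → pvValid mapa n dp →
      (pvFA mapa n k fila columna paso dp).1 = pvG mapa n k fila columna ∧
        pvValid mapa n (pvFA mapa n k fila columna paso dp).2 := by
  induction k with
  | zero =>
    intro fila columna paso dp hpaso hp0 hdp
    rw [pvFA.eq_def]
    by_cases hg : fila < 0 ∨ n ≤ fila ∨ columna < 0 ∨ n ≤ columna ∨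
        pvCell mapa fila columna = "B"
    · simp only [if_pos hg]
      exact ⟨(pvG_oob mapa n 0 fila columna hg).symm, hdp⟩
    · have hps : paso = 2 * n - 1 := by simp at hpaso; omega
      simp only [if_neg hg, if_pos hps]
      refine ⟨?_, hdp⟩
      rw [pvG]
      simp [hg]
  | succ k' ih =>
    intro fila columna paso dp hpaso hp0 hdp
    rw [pvFA.eq_def]
    by_cases hg : fila < 0 ∨ n ≤ fila ∨ columna < 0 ∨ n ≤ columna ∨
        pvCell mapa fila columna = "B"
    · simp only [if_pos hg]
      exact ⟨(pvG_oob mapa n (k' + 1) fila columna hg).symm, hdp⟩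
    · have hnn : ¬ fila < 0 ∧ ¬ n ≤ fila ∧ ¬ columna < 0 ∧ ¬ n ≤ columna := by tauto
      have hps : ¬ paso = 2 * n - 1 := by push_cast at hpaso; omega
      have hk : (2 * n - 1 - paso).toNat = k' + 1 := by push_cast at hpaso; omega
      simp only [if_neg hg, if_neg hps]
      by_cases hcache : pvDpGet dp fila columna paso ≠ -1
      · simp only [if_pos hcache]
        refine ⟨?_, hdp⟩
        rw [hdp fila columna paso (by omega) (by omega) hp0 hcache, hk]
      · simp only [if_neg hcache]
        obtain ⟨e1, v1⟩ := ih (fila + 1) columna (paso + 1) dp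
          (by push_cast at hpaso ⊢; omega) (by omega) hdp
        obtain ⟨e2, v2⟩ := ih (fila - 1) columna (paso + 1) _
          (by push_cast at hpaso ⊢; omega) (by omega) v1
        obtain ⟨e3, v3⟩ := ih fila (columna + 1) (paso + 1) _
          (by push_cast at hpaso ⊢; omega) (by omega) v2
        obtain ⟨e4, v4⟩ := ih fila (columna - 1) (paso + 1) _
          (by push_cast at hpaso ⊢; omega) (by omega) v3
        have hval : (if pvCell mapa fila columna = "R" then
            max (max (max (pvFA mapa n k' (fila + 1) columna (paso + 1) dp).1
              (pvFA mapa n k' (fila - 1) columna (paso + 1)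
                (pvFA mapa n k' (fila + 1) columna (paso + 1) dp).2).1)
              (pvFA mapa n k' fila (columna + 1) (paso + 1)
                (pvFA mapa n k' (fila - 1) columna (paso + 1)
                  (pvFA mapa n k' (fila + 1) columna (paso + 1) dp).2).2).1)
              (pvFA mapa n k' fila (columna - 1) (paso + 1)
                (pvFA mapa n k' fila (columna + 1) (paso + 1)
                  (pvFA mapa n k' (fila - 1) columna (paso + 1)
                    (pvFA mapa n k' (fila + 1) columna (paso + 1) dp).2).2).2).1 + 1
          else
            max (max (max (pvFA mapa n k' (fila + 1) columna (paso + 1) dp).1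
              (pvFA mapa n k' (fila - 1) columna (paso + 1)
                (pvFA mapa n k' (fila + 1) columna (paso + 1) dp).2).1)
              (pvFA mapa n k' fila (columna + 1) (paso + 1)
                (pvFA mapa n k' (fila - 1) columna (paso + 1)
                  (pvFA mapa n k' (fila + 1) columna (paso + 1) dp).2).2).1)
              (pvFA mapa n k' fila (columna - 1) (paso + 1)
                (pvFA mapa n k' fila (columna + 1) (paso + 1)
                  (pvFA mapa n k' (fila - 1) columna (paso + 1)
                    (pvFA mapa n k' (fila + 1) columna (paso + 1) dp).2).2).2).1) =
            pvG mapa n (k' + 1) fila columna := by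
          conv_rhs => rw [pvG]
          rw [e1, e2, e3, e4]
          simp only [if_neg hg]
        constructor
        · simpa using hval
        · refine pvValid_set mapa n _ fila columna paso _ (by omega) (by omega) hp0 v4 ?_
          rw [hk]
          simpa using hval
  

lemma pvLayAt_grid (m : Nat) (g : Nat → Nat → Int) (f c : Int)
    (hf : 0 ≤ f) (hfm : f < (m : Int)) (hc : 0 ≤ c) (hcm : c < (m : Int)) :
    pvLayAt ((List.range m).map fun i => (List.range m).map fun j => g i j) f c
      = g f.toNat c.toNat := by
  have hfm' : f.toNat < m := by omega
  have hcm' : c.toNat < m := by omega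
  simp [pvLayAt, PySem.List.pyGet?_of_nonneg, hf, hc, List.getElem?_map, hfm', hcm']

lemma pvBestStep_eq (mapa : List (List String)) (n : Int) (prev : List (List Int)) (j : Nat)
    (hprev : ∀ f c : Int, 0 ≤ f → f < n → 0 ≤ c → c < n → pvLayAt prev f c = pvG mapa n j f c)
    (f c : Int) (s : Int) (hs : -1 ≤ s) (d : Int × Int) :
    pvBestStep n prev f c s d = max s (pvG mapa n j (f + d.1) (c + d.2)) := by
  rw [pvBestStep]
  by_cases h : 0 ≤ f + d.1 ∧ f + d.1 < n ∧ 0 ≤ c + d.2 ∧ c + d.2 < n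
  · rw [if_pos h]
    rw [hprev (f + d.1) (c + d.2) h.1 h.2.1 h.2.2.1 h.2.2.2]
    rcases lt_or_ge s (pvG mapa n j (f + d.1) (c + d.2)) with hlt | hge
    · rw [if_pos hlt, max_eq_right hlt.le]
    · rw [if_neg (not_lt.mpr hge), max_eq_left hge]
  · rw [if_neg h]
    have h4 : f + d.1 < 0 ∨ n ≤ f + d.1 ∨ c + d.2 < 0 ∨ n ≤ c + d.2 := by omega
    rw [pvG_oob mapa n j (f + d.1) (c + d.2) (by tauto), max_eq_left hs]

lemma pvFold_eq (mapa : List (List String)) (n : Int) (prev : List (List Int)) (j : Nat)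
    (hprev : ∀ f c : Int, 0 ≤ f → f < n → 0 ≤ c → c < n → pvLayAt prev f c = pvG mapa n j f c)
    (f c : Int) :
    pvDirs.foldl (pvBestStep n prev f c) (-1) =
      max (max (max (pvG mapa n j (f + 1) c) (pvG mapa n j (f - 1) c))
        (pvG mapa n j f (c + 1))) (pvG mapa n j f (c - 1)) := by
  have e := pvBestStep_eq mapa n prev j hprev f c
  simp only [pvDirs, List.foldl_cons, List.foldl_nil]
  rw [e (-1) le_rfl ((1 : Int), (0 : Int)),
    e _ (le_max_left _ _) ((-1 : Int), (0 : Int)),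
    e _ ((le_max_left _ _).trans (le_max_left _ _)) ((0 : Int), (1 : Int)),
    e _ ((le_max_left _ _).trans ((le_max_left _ _).trans (le_max_left _ _)))
      ((0 : Int), (-1 : Int)),
    max_eq_right (pvG_ge_neg_one mapa n j (f + (1 : Int)) (c + (0 : Int)))]
  norm_num [sub_eq_add_neg]

lemma pvLast_at (mapa : List (List String)) (n : Int) (f c : Int)
    (hf : 0 ≤ f) (hfn : f < n) (hc : 0 ≤ c) (hcn : c < n) :
    pvLayAt (pvLast mapa n) f c = pvG mapa n 0 f c := by
  have hfm : f < ((n.toNat : Nat) : Int) := by omega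
  have hcm : c < ((n.toNat : Nat) : Int) := by omega
  rw [pvLast, pvLayAt_grid n.toNat _ f c hf hfm hc hcm,
    Int.toNat_of_nonneg hf, Int.toNat_of_nonneg hc, pvG]
  by_cases hB : pvCell mapa f c = "B"
  · simp [hB]
  · simp [hB]
    omega

lemma pvStep_at (mapa : List (List String)) (n : Int) (prev : List (List Int)) (j : Nat)
    (hprev : ∀ f c : Int, 0 ≤ f → f < n → 0 ≤ c → c < n → pvLayAt prev f c = pvG mapa n j f c)
    (f c : Int) (hf : 0 ≤ f) (hfn : f < n) (hc : 0 ≤ c) (hcn : c < n) :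
    pvLayAt (pvStep mapa n prev) f c = pvG mapa n (j + 1) f c := by
  have hfm : f < ((n.toNat : Nat) : Int) := by omega
  have hcm : c < ((n.toNat : Nat) : Int) := by omega
  rw [pvStep, pvLayAt_grid n.toNat _ f c hf hfm hc hcm,
    Int.toNat_of_nonneg hf, Int.toNat_of_nonneg hc]
  by_cases hB : pvCell mapa f c = "B"
  · rw [if_pos hB, pvG_oob mapa n (j + 1) f c (by tauto)]
  · have hoob : ¬(f < 0 ∨ n ≤ f ∨ c < 0 ∨ n ≤ c ∨ pvCell mapa f c = "B") := by
      rintro (h | h | h | h | h) <;> first | omega | exact hB h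
    rw [if_neg hB]
    conv_rhs => rw [pvG]
    rw [if_neg hoob]
    rw [pvFold_eq mapa n prev j hprev f c]

lemma pvFoldl_step (mapa : List (List String)) (n : Int) (m : Nat) :
    ∀ f c : Int, 0 ≤ f → f < n → 0 ≤ c → c < n →
      pvLayAt ((List.range m).foldl (fun prev _ => pvStep mapa n prev) (pvLast mapa n)) f c =
        pvG mapa n m f c := by
  induction m with
  | zero => intro f c hf hfn hc hcn; exact pvLast_at mapa n f c hf hfn hc hcn
  | succ m ih =>
    intro f c hf hfn hc hcn
    rw [List.range_succ, List.foldl_append, List.foldl_cons, List.foldl_nil]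
    exact pvStep_at mapa n _ m ih f c hf hfn hc hcn

-- ===== VERDICT (by name: the statement is the Claim_ definition above) =====
theorem escape_tridimensional_spec : Claim_equal_escape_tridimensional := by
  intro mapa n _hdom _hpre
  unfold Spec_escape_tridimensional escape_tridimensional escape_tridimensional_alt
  show (pvFA mapa n (2 * n - 1).toNat 0 0 0
      (List.replicate n.toNat (List.replicate n.toNat (List.replicate (2 * n).toNat (-1))))).1 =
    if n ≤ 0 then -1
    else if pvCell mapa 0 0 = "B" then -1
    else pvLayAt ((List.range (2 * n - 1).toNat).foldl (fun prev _ => pvStep mapa n prev)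
      (pvLast mapa n)) 0 0
  by_cases hn : n ≤ 0
  · rw [if_pos hn, pvFA.eq_def]
    simp [hn]
  · rw [if_neg hn]
    have hn' : 0 < n := by omega
    have h0 : (0 : Int) = 2 * n - 1 - ((2 * n - 1).toNat : Int) := by
      rw [Int.toNat_of_nonneg (by omega)]; omega
    have hmain := (pvFA_correct mapa n (2 * n - 1).toNat 0 0 0
      (List.replicate n.toNat (List.replicate n.toNat (List.replicate (2 * n).toNat (-1))))
      h0 le_rfl (pvValid_init mapa n n.toNat n.toNat (2 * n).toNat)).1
    rw [hmain]
    by_cases hB : pvCell mapa 0 0 = "B"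
    · rw [if_pos hB, pvG_oob mapa n _ 0 0 (Or.inr (Or.inr (Or.inr (Or.inr hB))))]
    · rw [if_neg hB, pvFoldl_step mapa n (2 * n - 1).toNat 0 0 le_rfl hn' le_rfl hn']
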